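-- pv_equiv track=rewrite | github.com/JeffZhangGit/megalgo | util/algo/algo11.py | sort_method
-- ===== SOURCE A (Python) =====
-- def sort_method(arg):
--     if not arg:
--         return []
--     neg = []
--     pos = []
--     for i in arg:
--         if i < 0:
--             neg.append(i)
--         if i > 0:
--             pos.append(i)
--     result = []
--
--     if len(pos) == 0:
--         return neg
--
--     for index in range(len(pos)):
--         result.append(pos[index])
--         if index < len(neg):
--             result.append(neg[index])
--     if len(pos) < len(neg):
--         for i in neg[len(pos):]:
--             result.append(i)
--     return result
-- ===== SOURCE B (Python) =====
-- def sort_method(arg):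
--     out, pq, nq = [], [], []
--     for x in arg:
--         if x > 0:
--             pq.append(x)
--         elif x < 0:
--             nq.append(x)
--         while pq and nq:
--             out.append(pq.pop(0))
--             out.append(nq.pop(0))
--     out.extend(pq or nq)
--     return out
-- ===== Notes on version B (the rewrite author's own statement) =====
-- stated objective: alternative
-- what changed: Replaces A's batch partition-then-index-loop-then-tail-loop with a single online pass: elements stream into two FIFO buffers and a pos/neg pair is emitted to the output as soon as both buffers are nonempty, the surviving buffer being flushed at the end.
import Mathlib
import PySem

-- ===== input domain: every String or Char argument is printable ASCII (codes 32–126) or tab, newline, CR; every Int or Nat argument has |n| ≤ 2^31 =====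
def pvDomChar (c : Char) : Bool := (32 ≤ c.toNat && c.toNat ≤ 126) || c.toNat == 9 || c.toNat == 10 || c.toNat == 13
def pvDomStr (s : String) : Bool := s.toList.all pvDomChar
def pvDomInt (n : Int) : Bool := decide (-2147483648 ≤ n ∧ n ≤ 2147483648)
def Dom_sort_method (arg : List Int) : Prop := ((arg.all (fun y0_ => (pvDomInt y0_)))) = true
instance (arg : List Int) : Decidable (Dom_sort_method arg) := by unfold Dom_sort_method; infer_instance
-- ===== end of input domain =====

-- B replaces A's batch partition + index loop + tail loop by a single online pass with two
-- FIFO buffers, emitting a pos/neg pair as soon as both buffers are nonempty (objective: alternative).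

-- ===== PORT A =====
def sort_method (arg : List Int) : List Int :=
  if arg = [] then []
  else
    let np := arg.foldl (fun (acc : List Int × List Int) i =>
      let acc := if i < 0 then (acc.1 ++ [i], acc.2) else acc
      if i > 0 then (acc.1, acc.2 ++ [i]) else acc) ([], [])
    let neg := np.1
    let pos := np.2
    if pos.length = 0 then neg
    else
      let result := (PySem.List.pyRange 0 (pos.length : Int) 1).foldl (fun res index =>
        let res := res ++ [PySem.List.pyGetD pos index 0]
        if index < (neg.length : Int) then res ++ [PySem.List.pyGetD neg index 0] else res) []
      if pos.length < neg.length then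
        (PySem.List.slice neg (some (pos.length : Int)) none).foldl (fun res i => res ++ [i]) result
      else result

-- ===== PORT B =====
-- the 'while pq and nq' drain loop of Source B
def pvDrain (out pq nq : List Int) : List Int × List Int × List Int :=
  match pq, nq with
  | p :: ps, q :: qs => pvDrain (out ++ [p, q]) ps qs
  | _, _ => (out, pq, nq)

def sort_method_alt (arg : List Int) : List Int :=
  let s := arg.foldl (fun (st : List Int × List Int × List Int) x =>
    let pn := if x > 0 then (st.2.1 ++ [x], st.2.2)
              else if x < 0 then (st.2.1, st.2.2 ++ [x])
              else (st.2.1, st.2.2)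
    pvDrain st.1 pn.1 pn.2) ([], [], [])
  s.1 ++ (if s.2.1 = [] then s.2.2 else s.2.1)

-- ===== PRECONDITION & SPEC =====
def Spec_sort_method (arg : List Int) (out : List Int) : Prop := out = sort_method_alt arg
instance (arg : List Int) (out : List Int) : Decidable (Spec_sort_method arg out) := by unfold Spec_sort_method; infer_instance

-- ===== CLAIM (what is proved, stated in full; the proofs are below) =====
def Claim_equal_sort_method : Prop := ∀ (arg : List Int), Dom_sort_method arg → Spec_sort_method arg (sort_method arg)

-- ===== LEMMAS AND PROOFS =====

-- the common target: positives and negatives interleaved, the longer stream's tail appended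
def pvTarget (P N : List Int) : List Int :=
  (P.zip N).flatMap (fun q => [q.1, q.2]) ++ P.drop N.length ++ N.drop P.length

theorem pvTarget_nil_left (N : List Int) : pvTarget [] N = N := by simp [pvTarget]

theorem pvTarget_nil_right (P : List Int) : pvTarget P [] = P := by simp [pvTarget]

theorem pvTarget_cons (x y : Int) (P N : List Int) :
    pvTarget (x :: P) (y :: N) = x :: y :: pvTarget P N := by
  simp [pvTarget]

-- A's single pass over arg builds exactly the two filtered lists.
theorem split_foldl (l : List Int) (a b : List Int) :
    l.foldl (fun (acc : List Int × List Int) i =>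
      let acc := if i < 0 then (acc.1 ++ [i], acc.2) else acc
      if i > 0 then (acc.1, acc.2 ++ [i]) else acc) (a, b)
    = (a ++ l.filter (fun i => decide (i < 0)), b ++ l.filter (fun i => decide (0 < i))) := by
  induction l generalizing a b with
  | nil => simp
  | cons x xs ih =>
    simp only [List.foldl_cons, List.filter_cons]
    by_cases h1 : x < 0
    · have h2 : ¬ x > 0 := by omega
      simp [h1, h2, ih]
    · by_cases h2 : x > 0
      · simp [h1, h2, ih]
      · simp [h1, h2, ih]

-- The interleaving of p and n by Nat index equals zip-flatten plus p's tail.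
theorem interleave_range (p n : List Int) :
    (List.range p.length).flatMap (fun k =>
      [p.getD k 0] ++ if k < n.length then [n.getD k 0] else [])
    = (p.zip n).flatMap (fun q => [q.1, q.2]) ++ p.drop n.length := by
  induction p generalizing n with
  | nil => simp
  | cons x xs ih =>
    rw [List.length_cons, List.range_succ_eq_map, List.flatMap_cons, List.flatMap_map]
    cases n with
    | nil => simpa using ih []
    | cons y ys =>
      simp only [List.length_cons, List.getD_cons_zero, Nat.zero_lt_succ, if_pos,
        List.getD_cons_succ, Nat.succ_lt_succ_iff, List.zip_cons_cons, List.flatMap_cons,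
        List.drop_succ_cons]
      have := ih ys
      rw [this]
      simp

-- A computes pvTarget of its two filtered lists.
theorem a_eq_target (arg : List Int) :
    sort_method arg
      = pvTarget (arg.filter (fun i => decide (0 < i))) (arg.filter (fun i => decide (i < 0))) := by
  unfold sort_method
  by_cases he : arg = []
  · simp [he, pvTarget]
  rw [if_neg he, split_foldl]
  simp only [List.nil_append]
  set pos := arg.filter (fun i => decide (0 < i)) with hpos
  set neg := arg.filter (fun i => decide (i < 0)) with hneg
  by_cases hp : pos.length = 0
  · rw [if_pos hp]
    rw [List.length_eq_zero_iff] at hp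
    rw [hp, pvTarget_nil_left]
  rw [if_neg hp]
  have hstep : (PySem.List.pyRange 0 (pos.length : Int) 1).foldl (fun res index =>
        let res := res ++ [PySem.List.pyGetD pos index 0]
        if index < (neg.length : Int) then res ++ [PySem.List.pyGetD neg index 0] else res) []
      = (PySem.List.pyRange 0 (pos.length : Int) 1).flatMap (fun index =>
        [PySem.List.pyGetD pos index 0] ++
          if index < (neg.length : Int) then [PySem.List.pyGetD neg index 0] else []) := by
    rw [show (fun (res : List Int) index =>
        let res := res ++ [PySem.List.pyGetD pos index 0]
        if index < (neg.length : Int) then res ++ [PySem.List.pyGetD neg index 0] else res)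
      = (fun (res : List Int) index => res ++
          ([PySem.List.pyGetD pos index 0] ++
            if index < (neg.length : Int) then [PySem.List.pyGetD neg index 0] else []))
      from by funext res index; by_cases h : index < (neg.length : Int) <;> simp [h]]
    rw [PySem.List.foldl_append_eq_flatMap]
    simp
  rw [hstep]
  have hrange : (PySem.List.pyRange 0 (pos.length : Int) 1).flatMap (fun index =>
        [PySem.List.pyGetD pos index 0] ++
          if index < (neg.length : Int) then [PySem.List.pyGetD neg index 0] else [])
      = (List.range pos.length).flatMap (fun k =>
        [pos.getD k 0] ++ if k < neg.length then [neg.getD k 0] else []) := by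
    rw [PySem.List.pyRange_zero_nat, List.flatMap_map]
    congr 1
    funext k
    simp [PySem.List.pyGetD_natCast]
  rw [hrange, interleave_range]
  by_cases hlt : pos.length < neg.length
  · rw [if_pos hlt]
    rw [PySem.List.foldl_append_singleton, PySem.List.slice_from_natCast]
    rw [List.drop_of_length_le (le_of_lt hlt)]
    unfold pvTarget
    rw [List.drop_of_length_le (le_of_lt hlt)]
  · rw [if_neg hlt]
    unfold pvTarget
    rw [List.drop_of_length_le (by omega : neg.length ≤ pos.length)]
    simp

-- B's online pass with two FIFO buffers (one of which is always empty) computes pvTarget.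
theorem b_fold_inv (l : List Int) (out pq nq : List Int) (h : pq = [] ∨ nq = []) :
    (let s := l.foldl (fun (st : List Int × List Int × List Int) x =>
        let pn := if x > 0 then (st.2.1 ++ [x], st.2.2)
                  else if x < 0 then (st.2.1, st.2.2 ++ [x])
                  else (st.2.1, st.2.2)
        pvDrain st.1 pn.1 pn.2) (out, pq, nq)
     s.1 ++ (if s.2.1 = [] then s.2.2 else s.2.1))
    = out ++ pvTarget (pq ++ l.filter (fun i => decide (0 < i)))
                      (nq ++ l.filter (fun i => decide (i < 0))) := by
  induction l generalizing out pq nq with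
  | nil =>
    simp only [List.foldl_nil, List.filter_nil, List.append_nil]
    rcases h with h | h
    · subst h; simp [pvTarget_nil_left]
    · subst h
      cases pq with
      | nil => simp [pvTarget_nil_left]
      | cons p ps => simp [pvTarget_nil_right]
  | cons x xs ih =>
    simp only [List.foldl_cons, List.filter_cons]
    by_cases h1 : x > 0
    · have h2 : ¬ x < 0 := by omega
      simp only [h1, h2, if_pos, if_neg, decide_true, decide_false,
        Bool.false_eq_true, ite_true, ite_false]
      rcases h with h | h
      · subst h
        cases nq with
        | nil =>
          rw [show pvDrain out ([] ++ [x]) [] = (out, [x], []) from rfl]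
          rw [ih out [x] [] (Or.inr rfl)]
          simp [h1, h2]
        | cons y ys =>
          rw [show pvDrain out ([] ++ [x]) (y :: ys) = (out ++ [x, y], [], ys) from rfl]
          rw [ih (out ++ [x, y]) [] ys (Or.inl rfl)]
          simp only [List.nil_append, List.cons_append, h1, decide_true, ite_true, h2,
            decide_false, Bool.false_eq_true, ite_false]
          rw [pvTarget_cons]
          simp
      · subst h
        cases pq with
        | nil =>
          rw [show pvDrain out ([] ++ [x]) [] = (out, [x], []) from rfl]
          rw [ih out [x] [] (Or.inr rfl)]
          simp [h1, h2]
        | cons p ps =>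
          rw [show pvDrain out ((p :: ps) ++ [x]) [] = (out, (p :: ps) ++ [x], []) from rfl]
          rw [ih out ((p :: ps) ++ [x]) [] (Or.inr rfl)]
          simp [h1, h2]
    · by_cases h2 : x < 0
      · simp only [h1, h2, if_pos, if_neg, ite_true, ite_false]
        rcases h with h | h
        · subst h
          rw [show pvDrain out [] (nq ++ [x]) = (out, [], nq ++ [x]) from rfl]
          rw [ih out [] (nq ++ [x]) (Or.inl rfl)]
          simp [h1, h2]
        · subst h
          cases pq with
          | nil =>
            rw [show pvDrain out [] ([] ++ [x]) = (out, [], [x]) from rfl]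
            rw [ih out [] [x] (Or.inl rfl)]
            simp [h1, h2]
          | cons p ps =>
            rw [show pvDrain out (p :: ps) ([] ++ [x]) = (out ++ [p, x], ps, []) from by cases ps <;> rfl]
            rw [ih (out ++ [p, x]) ps [] (Or.inr rfl)]
            simp only [List.nil_append, List.cons_append, h1, decide_false,
              Bool.false_eq_true, ite_false, h2, decide_true, ite_true]
            rw [pvTarget_cons]
            simp
      · simp only [h1, h2, ite_false]
        have hd : ∀ o (a b : List Int), a = [] ∨ b = [] → pvDrain o a b = (o, a, b) := by
          intro o a b hab
          rcases hab with hab | hab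
          · subst hab; cases b <;> rfl
          · subst hab; cases a <;> rfl
        rcases h with h | h
        · subst h
          rw [hd out [] nq (Or.inl rfl), ih out [] nq (Or.inl rfl)]
          simp [h1, h2]
        · subst h
          rw [hd out pq [] (Or.inr rfl), ih out pq [] (Or.inr rfl)]
          simp [h1, h2]

theorem b_eq_target (arg : List Int) :
    sort_method_alt arg
      = pvTarget (arg.filter (fun i => decide (0 < i))) (arg.filter (fun i => decide (i < 0))) := by
  unfold sort_method_alt
  have := b_fold_inv arg [] [] [] (Or.inl rfl)
  simpa using this

-- ===== VERDICT (by name: the statement is the Claim_ definition above) =====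
theorem sort_method_spec : Claim_equal_sort_method := by
  intro arg _
  unfold Spec_sort_method
  rw [a_eq_target, b_eq_target]
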